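-- pv_equiv track=rewrite | github.com/luhaoz/XMCrawlerApp | core/util.py | path_format
-- ===== SOURCE A (Python) =====
-- def path_format(path: str):
--     r_dir_filter = [
--         ('/', '_'),
--         ('\\', '_'),
--         (':', '：'),
--         ('*', '_'),
--         ('?', u'？'),
--         ('"', '_'),
--         ('<', '['),
--         ('>', ']'),
--         ('|', '_'),
--     ]
--     for filter_ele in r_dir_filter:
--         path = path.replace(filter_ele[0], filter_ele[1])
--     return path
-- ===== SOURCE B (Python) =====
-- _TABLE = str.maketrans({
--     '/': '_', '\\': '_', ':': '：', '*': '_', '?': '？',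
--     '"': '_', '<': '[', '>': ']', '|': '_',
-- })
--
-- def path_format(path: str):
--     return path.translate(_TABLE)
-- ===== Notes on version B (the rewrite author's own statement) =====
-- stated objective: idiomatic
-- what changed: Replaced the loop of nine sequential str.replace scans with one str.maketrans translation table applied in a single path.translate pass.
import Mathlib
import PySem

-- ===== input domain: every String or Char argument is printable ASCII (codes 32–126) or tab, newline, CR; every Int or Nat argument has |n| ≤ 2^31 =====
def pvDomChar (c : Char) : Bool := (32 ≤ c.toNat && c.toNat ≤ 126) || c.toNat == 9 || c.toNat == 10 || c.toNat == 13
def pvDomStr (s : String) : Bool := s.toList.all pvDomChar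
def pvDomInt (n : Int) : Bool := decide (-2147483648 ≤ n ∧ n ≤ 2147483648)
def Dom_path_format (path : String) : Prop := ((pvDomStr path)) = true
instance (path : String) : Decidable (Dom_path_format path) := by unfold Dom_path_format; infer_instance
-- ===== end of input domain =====

-- B replaces the loop of nine sequential str.replace scans by one translation table
-- applied in a single pass (str.maketrans / str.translate); same return value.

-- ===== PORT A =====
def path_format (path : String) : String :=
  let r_dir_filter : List (String × String) :=
    [ ("/", "_"), ("\\", "_"), (":", "："), ("*", "_"), ("?", "？"),
      ("\"", "_"), ("<", "["), (">", "]"), ("|", "_") ]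
  r_dir_filter.foldl (fun p fe => PySem.Str.replace p fe.1 fe.2) path

-- ===== PORT B =====
-- the translation table built by str.maketrans (all keys/values single characters)
def pvTrTable : PySem.Dict Char Char :=
  PySem.Dict.ofList
    [ ('/', '_'), ('\\', '_'), (':', '：'), ('*', '_'), ('?', '？'),
      ('"', '_'), ('<', '['), ('>', ']'), ('|', '_') ]

-- path.translate(table): one pass, each char looked up in the table (identity if absent)
def path_format_alt (path : String) : String :=
  String.ofList (path.toList.map (fun c => pvTrTable.getD c c))

-- ===== PRECONDITION & SPEC =====
def Spec_path_format (path : String) (out : String) : Prop := out = path_format_alt path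
instance (path : String) (out : String) : Decidable (Spec_path_format path out) := by unfold Spec_path_format; infer_instance

-- ===== CLAIM (what is proved, stated in full; the proofs are below) =====
def Claim_equal_path_format : Prop := ∀ (path : String), Dom_path_format path → Spec_path_format path (path_format path)

-- ===== LEMMAS AND PROOFS =====

/-- `replace.go` with a single-character pattern, enough fuel: substitutes char by char. -/
theorem replace_go_single (o : Char) (new : List Char) :
    ∀ (l acc : List Char) (fuel : Nat), l.length ≤ fuel →
      PySem.Chars.replace.go [o] new fuel l acc
        = acc.reverse ++ l.flatMap (fun c => if c = o then new else [c]) := by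
  intro l
  induction l with
  | nil =>
      intro acc fuel _
      cases fuel <;> simp [PySem.Chars.replace.go]
  | cons c t ih =>
      intro acc fuel hfuel
      cases fuel with
      | zero => simp at hfuel
      | succ fuel =>
        have ht : t.length ≤ fuel := by simpa using hfuel
        by_cases h : c = o
        · subst h
          simp [PySem.Chars.replace.go, List.isPrefixOf, ih _ _ ht]
        · have hpre : [o].isPrefixOf (c :: t) = false := by
            simp [List.isPrefixOf]
            exact fun hoc => (h hoc.symm).elim
          simp [PySem.Chars.replace.go, hpre, ih _ _ ht, h]

/-- Single-char replace is a character map. -/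
theorem replace_single (s : List Char) (o n : Char) :
    PySem.Chars.replace s [o] [n] = s.map (fun c => if c = o then n else c) := by
  rw [PySem.Chars.replace]
  simp only [List.isEmpty_cons, if_false, Bool.false_eq_true]
  rw [replace_go_single o [n] s [] s.length le_rfl]
  simp only [List.reverse_nil, List.nil_append]
  induction s with
  | nil => rfl
  | cons c t ih =>
      by_cases h : c = o <;> simp [List.flatMap_cons, h, ih]

theorem str_replace_single (s : String) (o n : Char) (os ns : String)
    (ho : os = String.ofList [o]) (hn : ns = String.ofList [n]) :
    PySem.Str.replace s os ns
      = String.ofList (s.toList.map (fun c => if c = o then n else c)) := by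
  subst ho hn
  rw [PySem.Str.replace]
  congr 1
  simpa only [String.toList_ofList] using replace_single s.toList o n

/-- The nine single-char substitutions, applied in sequence to one character,
agree with the translation-table lookup. -/
theorem tr_point (c : Char) :
    (fun x => if x = '|' then '_' else x)
      ((fun x => if x = '>' then ']' else x)
        ((fun x => if x = '<' then '[' else x)
          ((fun x => if x = '"' then '_' else x)
            ((fun x => if x = '?' then '？' else x)
              ((fun x => if x = '*' then '_' else x)
                ((fun x => if x = ':' then '：' else x)
                  ((fun x => if x = '\\' then '_' else x)
                    ((fun x => if x = '/' then '_' else x) c))))))))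
      = pvTrTable.getD c c := by
  by_cases h1 : c = '/'; · subst h1; decide
  by_cases h2 : c = '\\'; · subst h2; decide
  by_cases h3 : c = ':'; · subst h3; decide
  by_cases h4 : c = '*'; · subst h4; decide
  by_cases h5 : c = '?'; · subst h5; decide
  by_cases h6 : c = '"'; · subst h6; decide
  by_cases h7 : c = '<'; · subst h7; decide
  by_cases h8 : c = '>'; · subst h8; decide
  by_cases h9 : c = '|'; · subst h9; decide
  have hit : pvTrTable.items
      = [ ('/', '_'), ('\\', '_'), (':', '：'), ('*', '_'), ('?', '？'),
          ('"', '_'), ('<', '['), ('>', ']'), ('|', '_') ] := by rfl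
  have f : ∀ (k : Char), ¬ c = k → (k == c) = false :=
    fun k h => beq_eq_false_iff_ne.mpr (fun e => h e.symm)
  have hg : pvTrTable.getD c c = c := by
    simp [PySem.Dict.getD, PySem.Dict.get?, hit, List.find?,
      f _ h1, f _ h2, f _ h3, f _ h4, f _ h5, f _ h6, f _ h7, f _ h8, f _ h9]
  simp [h1, h2, h3, h4, h5, h6, h7, h8, h9, hg]

/-- Mapping the nine substitutions over a character list equals one table-lookup map. -/
theorem maps_eq (l : List Char) :
    List.map (fun c => if c = '|' then '_' else c)
      (List.map (fun c => if c = '>' then ']' else c)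
        (List.map (fun c => if c = '<' then '[' else c)
          (List.map (fun c => if c = '"' then '_' else c)
            (List.map (fun c => if c = '?' then '？' else c)
              (List.map (fun c => if c = '*' then '_' else c)
                (List.map (fun c => if c = ':' then '：' else c)
                  (List.map (fun c => if c = '\\' then '_' else c)
                    (List.map (fun c => if c = '/' then '_' else c) l))))))))
      = List.map (fun c => pvTrTable.getD c c) l := by
  induction l with
  | nil => rfl
  | cons c t ih =>
      simp only [List.map_cons]
      exact congrArg₂ List.cons (tr_point c) ih

-- ===== VERDICT (by name: the statement is the Claim_ definition above) =====
set_option maxHeartbeats 1000000 in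
theorem path_format_spec : Claim_equal_path_format := by
  intro path _
  show Spec_path_format path _
  unfold Spec_path_format path_format path_format_alt
  show PySem.Str.replace (PySem.Str.replace (PySem.Str.replace (PySem.Str.replace
        (PySem.Str.replace (PySem.Str.replace (PySem.Str.replace (PySem.Str.replace
          (PySem.Str.replace path "/" "_") "\\" "_") ":" "：") "*" "_") "?" "？")
        "\"" "_") "<" "[") ">" "]") "|" "_"
      = String.ofList (path.toList.map (fun c => pvTrTable.getD c c))
  simp only [
    str_replace_single _ '/' '_' "/" "_" rfl rfl,
    str_replace_single _ '\\' '_' "\\" "_" rfl rfl,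
    str_replace_single _ ':' '：' ":" "：" rfl rfl,
    str_replace_single _ '*' '_' "*" "_" rfl rfl,
    str_replace_single _ '?' '？' "?" "？" rfl rfl,
    str_replace_single _ '"' '_' "\"" "_" rfl rfl,
    str_replace_single _ '<' '[' "<" "[" rfl rfl,
    str_replace_single _ '>' ']' ">" "]" rfl rfl,
    str_replace_single _ '|' '_' "|" "_" rfl rfl,
    String.toList_ofList]
  rw [maps_eq]
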